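-- pv_equiv track=rewrite | github.com/smirfanshah/Blind75 | CodeSignal-InterviewPrac.py | solution7
-- ===== SOURCE A (Python) =====
-- def solution7(inputString, numbers):
--     """You are given a string of length at most 100 and an array of at most 100 integers. The task requires you to process both the string and the array simultaneously from their first elements, and continue as long as certain condition on the array is satisfied. Return the modified string and certain portion of the original array.
--
--     For the string, your goal is to replace every occurrence of a vowel with the next vowel in the sequence, wrapping around from 'u' to 'a'. If the character is a consonant, it should be replaced with the next consonant in alphabetical order, wrapping around from 'z' to 'b'.
--
--     Meanwhile, for the array of integers, you are instructed to multiply each integer by 3 and add the result to a total until that total reaches or exceeds 100. Each integer in the array can range from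
--     50 to 50, inclusive.
--
--     Finally, return the modified string and any unprocessed integers from the array in their original order.
--
--     Stop processing when the total sum, restricted to 100, is met or when all elements have been processed. In other words, process both the string and the array while the condition holds true.
--
--     If you process all elements in the array and the string, and the total sum still has not reached 100, simply return the processed string and an empty list.
--     Consider using Python's built-in functions such as ord(), chr(), and round() to aid in achieving this.
--
--     The final return format should be a tuple containing the modified string and the list of unprocessed integers.
--
--     Example:
--
--     Input:
--
--     String: "examplestring"
--     Array: {1, 2, 3, 4, 5, 6, 7, 8, 9, 10}"""
--
--
--
--     vowels = 'aeiou'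
--     consonants = 'bcdfghjklmnpqrstvwxyz'
--     total= 0
--     result = ''
--     for ch in inputString:
--         if not numbers:
--             break
--
--         if ch in vowels:
--             result += vowels[(vowels.index(ch)+1) %len(vowels)]
--         else:
--             result += consonants[(consonants.index(ch)+1) %len(consonants)]
--
--         total += numbers[0]*3
--
--         numbers.pop(0)
--         if total>=100:
--             break
--
--     return result, numbers
-- ===== SOURCE B (Python) =====
-- def solution7(inputString, numbers):
--     vowels = 'aeiou'
--     consonants = 'bcdfghjklmnpqrstvwxyz'
--     # Phase 1: decide how many items get processed (the item that pushes
--     # the tripled total to >= 100 is still processed).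
--     limit = min(len(inputString), len(numbers))
--     k = 0
--     total = 0
--     while k < limit and total < 100:
--         total += 3 * numbers[k]
--         k += 1
--     # Phase 2: shift exactly those k characters.
--     result = ''.join(
--         vowels[(vowels.index(ch) + 1) % 5] if ch in vowels
--         else consonants[(consonants.index(ch) + 1) % 21]
--         for ch in inputString[:k])
--     # Same in-place mutation of the argument as A's repeated pop(0).
--     del numbers[:k]
--     return result, numbers
-- ===== Notes on version B (the rewrite author's own statement) =====
-- stated objective: simpler
-- what changed: Instead of one fused loop that shifts a char, pops numbers[0] and checks the total each iteration, B first computes the cutoff k by a prefix-sum scan over numbers, then shifts inputString[:k] in one comprehension and deletes numbers[:k] in place.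
import Mathlib
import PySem

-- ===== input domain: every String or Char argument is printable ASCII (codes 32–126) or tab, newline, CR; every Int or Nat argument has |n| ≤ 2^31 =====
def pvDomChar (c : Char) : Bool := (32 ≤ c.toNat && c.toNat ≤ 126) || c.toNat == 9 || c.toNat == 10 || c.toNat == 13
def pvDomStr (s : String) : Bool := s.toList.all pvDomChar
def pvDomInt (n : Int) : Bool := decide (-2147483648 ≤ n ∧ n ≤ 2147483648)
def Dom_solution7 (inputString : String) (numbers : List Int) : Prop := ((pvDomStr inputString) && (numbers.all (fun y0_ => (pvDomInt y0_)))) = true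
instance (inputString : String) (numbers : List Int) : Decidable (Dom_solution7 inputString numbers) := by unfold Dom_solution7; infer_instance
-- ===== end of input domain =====

-- B replaces A's fused shift/pop/check loop by a prefix-sum cutoff k, then shifts s[:k]
-- and drops numbers[:k] (simpler decomposition). Both A and B mutate `numbers` in place
-- identically; the equivalence proved here is about the returned pair.


-- ===== PORT A =====
def pvVowels : List Char := ['a', 'e', 'i', 'o', 'u']
def pvConsonants : List Char :=
  ['b', 'c', 'd', 'f', 'g', 'h', 'j', 'k', 'l', 'm', 'n',
   'p', 'q', 'r', 's', 't', 'v', 'w', 'x', 'y', 'z']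

-- the shift both Pythons apply to one character (Python raises ValueError on a
-- character outside a–z; those inputs are excluded by Pre_solution7, the getD
-- default there is never reached inside Pre_)
def pvShiftChar (ch : Char) : Char :=
  if pvVowels.contains ch then
    pvVowels.getD ((pvVowels.idxOf ch + 1) % 5) 'a'
  else
    pvConsonants.getD ((pvConsonants.idxOf ch + 1) % 21) 'a'

-- A's loop: state = (remaining chars, remaining numbers, total, result so far)
def solution7_go : List Char → List Int → Int → List Char → String × List Int
  | [], ns, _, res => (String.mk res, ns)
  | _ :: _, [], _, res => (String.mk res, [])      -- `if not numbers: break`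
  | ch :: cs, n :: rest, total, res =>
    let res' := res ++ [pvShiftChar ch]
    let total' := total + n * 3
    if total' ≥ 100 then (String.mk res', rest)    -- `if total >= 100: break`
    else solution7_go cs rest total' res'

def solution7 (inputString : String) (numbers : List Int) : String × List Int :=
  solution7_go inputString.toList numbers 0 []

-- ===== PORT B =====
-- B's phase 1: `while k < limit and total < 100: total += 3*numbers[k]; k += 1`
def solution7_kGo : List Int → Nat → Int → Nat
  | _, 0, _ => 0
  | [], _ + 1, _ => 0
  | n :: rest, lim + 1, total =>
    let total' := total + 3 * n
    if total' ≥ 100 then 1 else 1 + solution7_kGo rest lim total'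

def solution7_alt (inputString : String) (numbers : List Int) : String × List Int :=
  let limit := min inputString.toList.length numbers.length
  let k := solution7_kGo numbers limit 0
  (String.mk ((inputString.toList.take k).map pvShiftChar), numbers.drop k)

-- ===== PRECONDITION & SPEC =====
-- Pre_ excludes exactly the inputs on which Python A raises ValueError: some
-- character that actually gets processed (index i below both lengths, reached
-- while the tripled running total is still < 100) is not a lowercase letter a–z.
def Pre_solution7 (inputString : String) (numbers : List Int) : Prop :=
  ∀ i, i < min inputString.toList.length numbers.length →
    3 * ((numbers.take i).foldl (· + ·) 0) < 100 →
    ('a' ≤ inputString.toList.getD i 'a' ∧ inputString.toList.getD i 'a' ≤ 'z')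
instance (inputString : String) (numbers : List Int) : Decidable (Pre_solution7 inputString numbers) := by
  unfold Pre_solution7; infer_instance

def pvWitness_solution7 : String × List Int := ("abcu", [40, -2, 5])

def Spec_solution7 (inputString : String) (numbers : List Int) (out : String × List Int) : Prop := out = solution7_alt inputString numbers
instance (inputString : String) (numbers : List Int) (out : String × List Int) : Decidable (Spec_solution7 inputString numbers out) := by unfold Spec_solution7; infer_instance

-- ===== CLAIM (what is proved, stated in full; the proofs are below) =====
def Claim_equal_solution7 : Prop := ∀ (inputString : String) (numbers : List Int), Dom_solution7 inputString numbers → Pre_solution7 inputString numbers → Spec_solution7 inputString numbers (solution7 inputString numbers)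

-- ===== LEMMAS AND PROOFS =====

-- loop invariant: A's fused loop equals "cutoff k, then take/map and drop"
lemma solution7_go_eq (cs : List Char) :
    ∀ (ns : List Int) (total : Int) (res : List Char),
      solution7_go cs ns total res =
        (String.mk (res ++ (cs.take (solution7_kGo ns (min cs.length ns.length) total)).map pvShiftChar),
         ns.drop (solution7_kGo ns (min cs.length ns.length) total)) := by
  induction cs with
  | nil => intro ns total res; simp [solution7_go, solution7_kGo]
  | cons ch cs ih =>
    intro ns total res
    cases ns with
    | nil => simp [solution7_go, solution7_kGo]
    | cons n rest =>
      have hmin : min (ch :: cs).length (n :: rest).length = min cs.length rest.length + 1 := by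
        simp [Nat.succ_min_succ]
      rw [hmin]
      have hmul : n * 3 = 3 * n := by ring
      by_cases h : total + 3 * n ≥ 100
      · simp [solution7_go, solution7_kGo, hmul, h]
      · simp only [solution7_go, solution7_kGo, hmul, if_neg h]
        rw [ih rest (total + 3 * n) (res ++ [pvShiftChar ch]),
          Nat.add_comm 1 (solution7_kGo rest (min cs.length rest.length) (total + 3 * n))]
        simp [List.take_succ_cons, List.drop_succ_cons]

-- ===== VERDICT (by name: the statement is the Claim_ definition above) =====
theorem solution7_spec : Claim_equal_solution7 := by
  intro s ns _ _
  unfold Spec_solution7 solution7 solution7_alt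
  rw [solution7_go_eq]
  simp
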